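-- pv_equiv track=rewrite | github.com/NLPatVCU/GutBrainIE | model.py | map_labels
-- ===== SOURCE A (Python) =====
-- def map_labels(labels): #map labels to ints (model works with numbers, not string labels :) )
--     label_to_int = {}
--     counter = 1
--     label_to_int["NONE"] = 0
--     for label in labels:
--         if label not in label_to_int:
--             label_to_int[label] = counter
--             counter+=1
--     dist = {label_to_int[x]:0 for x in label_to_int}
--     for label in labels:
--         dist[label_to_int[label]]+=1
--     return label_to_int, dist
--
-- label_to_int = {'NONE': 0, 'impact': 1, 'influence': 2, 'interact': 3, 'located in': 4, 'change expression': 5, 'target': 6, 'part of': 7, 'used by': 8, 'change abundance': 9, 'is linked to': 10, 'strike': 11, 'affect': 12, 'change effect': 13, 'produced by': 14, 'administered': 15, 'is a': 16, 'compared to': 17}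
-- ===== SOURCE B (Python) =====
-- def map_labels(labels):
--     # one fused pass: assign codes and count in the same loop
--     label_to_int = {"NONE": 0}
--     dist = {0: 0}
--     for label in labels:
--         code = label_to_int.setdefault(label, len(label_to_int))
--         dist[code] = dist.get(code, 0) + 1
--     return label_to_int, dist
-- ===== Notes on version B (the rewrite author's own statement) =====
-- stated objective: simpler
-- what changed: B replaces A's staged design (one loop building the table, a comprehension seeding zeros, a second full scan incrementing counts) with a single fused pass that maintains both dicts at once, using setdefault to assign codes and counting in the same loop.
import Mathlib
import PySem

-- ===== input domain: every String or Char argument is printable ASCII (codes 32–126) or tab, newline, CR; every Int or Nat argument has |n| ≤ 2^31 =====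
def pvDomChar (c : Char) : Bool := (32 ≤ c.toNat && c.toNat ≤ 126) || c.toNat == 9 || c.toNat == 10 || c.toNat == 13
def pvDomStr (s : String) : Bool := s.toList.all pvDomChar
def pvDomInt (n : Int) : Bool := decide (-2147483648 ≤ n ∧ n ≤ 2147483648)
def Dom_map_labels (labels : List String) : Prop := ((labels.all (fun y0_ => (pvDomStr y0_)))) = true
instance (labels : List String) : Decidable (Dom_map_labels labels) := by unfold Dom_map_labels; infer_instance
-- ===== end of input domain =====

-- B replaces A's staged passes (build table, seed zero dist, second counting scan) by a single
-- fused pass maintaining both dicts at once (setdefault assigns the code, the same loop counts).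

-- ===== PORT A =====
def map_labels (labels : List String) : (List (String × Int)) × (List (Int × Int)) :=
  let label_to_int : PySem.Dict String Int := PySem.Dict.empty
  let label_to_int := label_to_int.insert "NONE" 0
  let counter : Int := 1
  let st := labels.foldl (fun (p : PySem.Dict String Int × Int) label =>
      if p.1.contains label then p else (p.1.insert label p.2, p.2 + 1)) (label_to_int, counter)
  let label_to_int := st.1
  -- {label_to_int[x]: 0 for x in label_to_int}; every x iterated is a key, so getD never defaults
  let dist : PySem.Dict Int Int := label_to_int.keys.foldl
      (fun d x => d.insert (label_to_int.getD x 0) 0) PySem.Dict.empty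
  -- dist[label_to_int[label]] += 1; both keys always present, so modify/getD are exact here
  let dist := labels.foldl (fun d label => d.modify (label_to_int.getD label 0) 0 (· + 1)) dist
  (label_to_int.items, dist.items)

-- ===== PORT B =====
def map_labels_alt (labels : List String) : (List (String × Int)) × (List (Int × Int)) :=
  let st := labels.foldl
    (fun (p : PySem.Dict String Int × PySem.Dict Int Int) label =>
      -- code = label_to_int.setdefault(label, len(label_to_int)); after it, label is a key, so getD is exact
      let t := p.1.setdefault label (p.1.size : Int)
      let code := t.getD label 0
      -- dist[code] = dist.get(code, 0) + 1
      (t, p.2.insert code (p.2.getD code 0 + 1)))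
    ((PySem.Dict.empty : PySem.Dict String Int).insert "NONE" 0,
     (PySem.Dict.empty : PySem.Dict Int Int).insert 0 0)
  (st.1.items, st.2.items)

-- ===== PRECONDITION & SPEC =====
def Spec_map_labels (labels : List String) (out : (List (String × Int)) × (List (Int × Int))) : Prop := out = map_labels_alt labels
instance (labels : List String) (out : (List (String × Int)) × (List (Int × Int))) : Decidable (Spec_map_labels labels out) := by unfold Spec_map_labels; infer_instance

-- ===== CLAIM (what is proved, stated in full; the proofs are below) =====
def Claim_equal_map_labels : Prop := ∀ (labels : List String), Dom_map_labels labels → Spec_map_labels labels (map_labels labels)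

-- ===== LEMMAS AND PROOFS =====

-- proof-only helpers: pvTl is the staged table loop B's fused pass is decomposed into;
-- pvIns numbers fresh keys by current size; pvNew is the list of first occurrences not yet
-- seen; pvNum numbers a list from i.
def pvTl (l : List String) (t : PySem.Dict String Int) : PySem.Dict String Int :=
  l.foldl (fun t x => if t.contains x then t else t.insert x (t.size : Int)) t

def pvIns (d : PySem.Dict String Int) (l : List String) : PySem.Dict String Int :=
  l.foldl (fun d x => d.insert x (d.size : Int)) d

def pvNew (seen : List String) : List String → List String
  | [] => []
  | x :: l => if x ∈ seen then pvNew seen l else x :: pvNew (seen ++ [x]) l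

def pvNum : List String → Nat → List (String × Int)
  | [], _ => []
  | x :: l, i => (x, (i : Int)) :: pvNum l (i + 1)

theorem pvTl_get?_pres (l : List String) : ∀ (t : PySem.Dict String Int) (x : String),
    t.contains x = true → (pvTl l t).get? x = t.get? x := by
  induction l with
  | nil => intro t x _; rfl
  | cons y l ih =>
    intro t x hx
    simp only [pvTl, List.foldl_cons]
    by_cases hc : t.contains y = true
    · rw [if_pos hc]; exact ih t x hx
    · rw [if_neg hc]
      have hne : x ≠ y := fun h => hc (h ▸ hx)
      have hx' : (t.insert y (t.size : Int)).contains x = true := by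
        rw [PySem.Dict.contains_insert]; simp [hx]
      have := ih (t.insert y (t.size : Int)) x hx'
      simp only [pvTl] at this
      rw [this, PySem.Dict.get?_insert_of_ne _ _ hne]

-- B's fused pass equals the staged table loop plus a counting fold against the FINAL table
theorem pvFuse (l : List String) : ∀ (t : PySem.Dict String Int) (d : PySem.Dict Int Int),
    l.foldl (fun (p : PySem.Dict String Int × PySem.Dict Int Int) label =>
        let t' := p.1.setdefault label (p.1.size : Int)
        let code := t'.getD label 0
        (t', p.2.insert code (p.2.getD code 0 + 1))) (t, d)
      = (pvTl l t,
         l.foldl (fun d x => d.insert ((pvTl l t).getD x 0) (d.getD ((pvTl l t).getD x 0) 0 + 1)) d) := by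
  induction l with
  | nil => intro t d; rfl
  | cons x l ih =>
    intro t d
    simp only [List.foldl_cons, pvTl]
    by_cases hc : t.contains x = true
    · have hsd : t.setdefault x (t.size : Int) = t := PySem.Dict.setdefault_of_contains t _ hc
      have hcode : (pvTl l t).getD x 0 = t.getD x 0 := by
        rw [PySem.Dict.getD_eq_get?_getD, pvTl_get?_pres l t x hc, ← PySem.Dict.getD_eq_get?_getD]
      simp only [pvTl] at hcode
      rw [if_pos hc]
      have := ih t (d.insert (t.getD x 0) (d.getD (t.getD x 0) 0 + 1))
      simp only [pvTl] at this
      simp only [hsd, this]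
      rw [hcode]
    · have hc' : t.contains x = false := by simpa using hc
      have hsd : t.setdefault x (t.size : Int) = t.insert x (t.size : Int) :=
        PySem.Dict.setdefault_of_not_contains t _ hc'
      have hmem : (t.insert x (t.size : Int)).contains x = true :=
        PySem.Dict.contains_insert_self _ _ _
      have hcode0 : (t.insert x (t.size : Int)).getD x 0 = (t.size : Int) :=
        PySem.Dict.getD_insert_self _ _ _ _
      have hcode : (pvTl l (t.insert x (t.size : Int))).getD x 0 = (t.size : Int) := by
        rw [PySem.Dict.getD_eq_get?_getD, pvTl_get?_pres l _ x hmem,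
            ← PySem.Dict.getD_eq_get?_getD, hcode0]
      rw [if_neg hc]
      simp only [pvTl] at hcode
      have := ih (t.insert x (t.size : Int))
        (d.insert (t.size : Int) (d.getD (t.size : Int) 0 + 1))
      simp only [pvTl] at this
      simp only [hsd, hcode0, this]
      rw [hcode]

theorem pvNew_congr (l : List String) : ∀ s t : List String, (∀ x, x ∈ s ↔ x ∈ t) →
    pvNew s l = pvNew t l := by
  induction l with
  | nil => intro s t h; rfl
  | cons x l ih =>
    intro s t h
    simp only [pvNew]
    by_cases hx : x ∈ s
    · rw [if_pos hx, if_pos ((h x).1 hx)]; exact ih s t h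
    · rw [if_neg hx, if_neg (fun hc => hx ((h x).2 hc))]
      refine congrArg (x :: ·) (ih _ _ ?_)
      intro y; simp [h y]

theorem pvSet_update_eq (l : List String) : ∀ s : List String,
    PySem.Set.update s l = s ++ pvNew s l := by
  induction l with
  | nil => intro s; simp [PySem.Set.update, pvNew]
  | cons x l ih =>
    intro s
    simp only [PySem.Set.update, List.foldl_cons, pvNew]
    by_cases hx : x ∈ s
    · rw [if_pos hx]
      have : PySem.Set.add s x = s := by simp [PySem.Set.add, PySem.Set.contains, hx]
      rw [this]; exact ih s
    · rw [if_neg hx]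
      have : PySem.Set.add s x = s ++ [x] := by simp [PySem.Set.add, PySem.Set.contains, hx]
      rw [this]
      have := ih (s ++ [x])
      simp only [PySem.Set.update] at this
      rw [this, List.append_assoc]; rfl

theorem pvNew_filter (l : List String) : ∀ (s : List String) (a : String),
    pvNew (s ++ [a]) l = (pvNew s l).filter (fun x => x != a) := by
  induction l with
  | nil => intro s a; rfl
  | cons x l ih =>
    intro s a
    simp only [pvNew]
    by_cases hx : x ∈ s
    · rw [if_pos (by simp [hx]), if_pos hx]; exact ih s a
    · by_cases hxa : x = a
      · subst hxa
        rw [if_pos (by simp), if_neg hx]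
        simp only [List.filter_cons, bne_self_eq_false, Bool.false_eq_true, if_false]
        rw [← ih (s ++ [x]) x]
        exact pvNew_congr l _ _ (by intro y; simp)
      · rw [if_neg (by simp [hx, hxa]), if_neg hx]
        simp only [List.filter_cons]
        rw [if_pos (by simp [hxa])]
        refine congrArg (x :: ·) ?_
        rw [← ih (s ++ [x]) a, pvNew_congr l (s ++ [a] ++ [x]) (s ++ [x] ++ [a]) (by intro y; simp; tauto)]

theorem pvLoopA (l : List String) : ∀ d : PySem.Dict String Int,
    l.foldl (fun (p : PySem.Dict String Int × Int) label =>
        if p.1.contains label then p else (p.1.insert label p.2, p.2 + 1)) (d, (d.size : Int))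
      = (pvIns d (pvNew d.keys l), ((pvIns d (pvNew d.keys l)).size : Int)) := by
  induction l with
  | nil => intro d; simp [pvNew, pvIns]
  | cons x l ih =>
    intro d
    simp only [List.foldl_cons, pvNew]
    by_cases hx : x ∈ d.keys
    · have hc : d.contains x = true := by
        rw [PySem.Dict.contains_eq_decide_mem_keys]; simpa using hx
      rw [if_pos hc, if_pos hx]; exact ih d
    · have hc : d.contains x = false := by
        rw [PySem.Dict.contains_eq_decide_mem_keys]; simpa using hx
      rw [if_neg (by simp [hc]), if_neg hx]
      have hsz : ((d.insert x (d.size : Int)).size : Int) = (d.size : Int) + 1 := by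
        rw [PySem.Dict.size_insert, if_neg (by simp [hc])]; push_cast; ring
      have hkeys : (d.insert x (d.size : Int)).keys = d.keys ++ [x] :=
        PySem.Dict.keys_insert_of_not_contains d _ hc
      rw [← hsz, ih (d.insert x (d.size : Int)), hkeys]
      rfl

-- the staged table loop is A's first loop (the counter is invariantly the dict's size)
theorem pvTl_eq (l : List String) : ∀ t : PySem.Dict String Int,
    pvTl l t = pvIns t (pvNew t.keys l) := by
  induction l with
  | nil => intro t; simp [pvTl, pvNew, pvIns]
  | cons x l ih =>
    intro t
    simp only [pvTl, List.foldl_cons, pvNew]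
    by_cases hx : x ∈ t.keys
    · have hc : t.contains x = true := by
        rw [PySem.Dict.contains_eq_decide_mem_keys]; simpa using hx
      rw [if_pos hc, if_pos hx]; exact ih t
    · have hc : t.contains x = false := by
        rw [PySem.Dict.contains_eq_decide_mem_keys]; simpa using hx
      rw [if_neg (by simp [hc]), if_neg hx]
      have hkeys : (t.insert x (t.size : Int)).keys = t.keys ++ [x] :=
        PySem.Dict.keys_insert_of_not_contains t _ hc
      have := ih (t.insert x (t.size : Int))
      simp only [pvTl] at this
      rw [this, hkeys]
      rfl

theorem pvIns_items (l : List String) : ∀ d : PySem.Dict String Int,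
    l.Nodup → (∀ x ∈ l, d.contains x = false) →
    (pvIns d l).items = d.items ++ pvNum l d.size := by
  induction l with
  | nil => intro d _ _; simp [pvIns, pvNum]
  | cons x l ih =>
    intro d hnd hf
    have hcx : d.contains x = false := hf x (by simp)
    have hstep : pvIns d (x :: l) = pvIns (d.insert x (d.size : Int)) l := rfl
    have hsz : (d.insert x (d.size : Int)).size = d.size + 1 := by
      rw [PySem.Dict.size_insert, if_neg (by simp [hcx])]
    have hfresh : ∀ y ∈ l, (d.insert x (d.size : Int)).contains y = false := by
      intro y hy
      rw [PySem.Dict.contains_insert]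
      have : y ≠ x := fun h => (List.nodup_cons.1 hnd).1 (h ▸ hy)
      simp [this, hf y (by simp [hy])]
    rw [hstep, ih _ (List.nodup_cons.1 hnd).2 hfresh,
        PySem.Dict.items_insert_of_not_contains d _ hcx, hsz]
    simp [pvNum, List.append_assoc]

theorem pvNum_fst (l : List String) : ∀ i, (pvNum l i).map (·.1) = l := by
  induction l with
  | nil => intro i; rfl
  | cons x l ih => intro i; simp [pvNum, ih]

theorem pvNum_snd_bound (l : List String) : ∀ i c, c ∈ (pvNum l i).map (·.2) → (i : Int) ≤ c := by
  induction l with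
  | nil => intro i c h; simp [pvNum] at h
  | cons x l ih =>
    intro i c h
    simp only [pvNum, List.map_cons, List.mem_cons] at h
    rcases h with h | h
    · omega
    · have := ih (i + 1) c h; push_cast at this ⊢; omega

theorem pvNum_snd_pairwise (l : List String) : ∀ i, ((pvNum l i).map (·.2)).Pairwise (· < ·) := by
  induction l with
  | nil => intro i; simp [pvNum]
  | cons x l ih =>
    intro i
    simp only [pvNum, List.map_cons, List.pairwise_cons]
    refine ⟨fun c hc => ?_, ih (i + 1)⟩
    have := pvNum_snd_bound l (i + 1) c hc
    push_cast at this ⊢; omega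

theorem pvOfList_map (f : String → Int) (l : List String)
    (hinj : ∀ x ∈ l, ∀ y ∈ l, f x = f y → x = y) :
    PySem.Set.ofList (l.map f) = (PySem.Set.ofList l).map f := by
  induction l using List.reverseRecOn with
  | nil => rfl
  | append_singleton l a ih =>
    have hinj' : ∀ x ∈ l, ∀ y ∈ l, f x = f y → x = y := by
      intro x hx y hy
      exact hinj x (by simp [hx]) y (by simp [hy])
    rw [List.map_append, List.map_singleton, PySem.Set.ofList_append_singleton,
        PySem.Set.ofList_append_singleton, ih hinj']
    by_cases hm : a ∈ PySem.Set.ofList l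
    · have hal : a ∈ l := (PySem.Set.mem_ofList l a).1 hm
      have hmf : f a ∈ (PySem.Set.ofList l).map f := List.mem_map.2 ⟨a, hm, rfl⟩
      simp [PySem.Set.add, PySem.Set.contains, hm, hmf]
    · have hmf : f a ∉ (PySem.Set.ofList l).map f := by
        intro hc
        obtain ⟨b, hb, hfb⟩ := List.mem_map.1 hc
        have hbl : b ∈ l := (PySem.Set.mem_ofList l b).1 hb
        exact hm ((hinj b (by simp [hbl]) a (by simp) hfb) ▸ hb)
      simp [PySem.Set.add, PySem.Set.contains, hm, hmf]

theorem pvSet_update_of_subset (l : List Int) : ∀ s : List Int, (∀ x ∈ l, x ∈ s) →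
    PySem.Set.update s l = s := by
  induction l with
  | nil => intro s _; rfl
  | cons x l ih =>
    intro s h
    simp only [PySem.Set.update, List.foldl_cons]
    have : PySem.Set.add s x = s := by
      simp [PySem.Set.add, PySem.Set.contains, h x (by simp)]
    rw [this]
    exact ih s (fun y hy => h y (by simp [hy]))

theorem pvItems_ext (d d' : PySem.Dict Int Int) (hnd : d.keys.Nodup)
    (hk : d.keys = d'.keys) (hv : ∀ k ∈ d.keys, d.getD k 0 = d'.getD k 0) :
    d.items = d'.items := by
  have hnd' : d'.keys.Nodup := hk ▸ hnd
  have hlen : d.items.length = d'.items.length := by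
    have := congrArg List.length hk
    simpa [PySem.Dict.keys] using this
  apply List.ext_getElem hlen
  intro i h1 h2
  have m1 : (d.items[i].1, d.items[i].2) ∈ d.items := by simp
  have m2 : (d'.items[i].1, d'.items[i].2) ∈ d'.items := by simp
  have g1 : d.getD d.items[i].1 0 = d.items[i].2 := PySem.Dict.getD_of_mem_items d m1 hnd 0
  have g2 : d'.getD d'.items[i].1 0 = d'.items[i].2 := PySem.Dict.getD_of_mem_items d' m2 hnd' 0
  have hkey : d.items[i].1 = d'.items[i].1 := by
    have h := congrArg (fun l => l[i]?) hk
    simp only [PySem.Dict.keys, List.getElem?_map] at h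
    rw [List.getElem?_eq_getElem h1, List.getElem?_eq_getElem h2] at h
    simpa using h
  have hmemk : d.items[i].1 ∈ d.keys := by
    simp only [PySem.Dict.keys]
    exact List.mem_map_of_mem (List.getElem_mem h1)
  have hval : d.items[i].2 = d'.items[i].2 := by
    rw [← g1, hv _ hmemk, hkey, g2]
  exact Prod.ext hkey hval

-- ===== VERDICT (by name: the statement is the Claim_ definition above) =====
theorem map_labels_spec : Claim_equal_map_labels := by
  intro labels _
  unfold Spec_map_labels
  simp only [map_labels, map_labels_alt]
  set d0 : PySem.Dict String Int := (PySem.Dict.empty : PySem.Dict String Int).insert "NONE" 0 with hd0def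
  set c0 : PySem.Dict Int Int := (PySem.Dict.empty : PySem.Dict Int Int).insert 0 0 with hc0def
  have hone : ((d0.size : Nat) : Int) = 1 := by rfl
  have hkeys0 : d0.keys = ["NONE"] := by rfl
  set ds : List String := (pvNew [] labels).filter (fun x => x != "NONE") with hdsdef
  have hofl : PySem.Set.ofList labels = pvNew [] labels := by
    have h := pvSet_update_eq labels []
    simpa [PySem.Set.update] using h
  have hds : pvNew ["NONE"] labels = ds := by
    have h := pvNew_filter labels [] "NONE"
    simpa using h
  set M : PySem.Dict String Int := pvIns d0 ds with hMdef
  -- A's first loop produces M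
  have hA1 : labels.foldl (fun (p : PySem.Dict String Int × Int) label =>
      if p.1.contains label then p else (p.1.insert label p.2, p.2 + 1)) (d0, 1)
      = (M, (M.size : Int)) := by
    have h := pvLoopA labels d0
    rw [hkeys0, hds, hone] at h
    exact h
  -- B's fused pass: staged decomposition, and its table is M too
  have hTl : pvTl labels d0 = M := by
    rw [pvTl_eq labels d0, hkeys0, hds]
  have hB1 : labels.foldl (fun (p : PySem.Dict String Int × PySem.Dict Int Int) label =>
        let t' := p.1.setdefault label (p.1.size : Int)
        let code := t'.getD label 0
        (t', p.2.insert code (p.2.getD code 0 + 1))) (d0, c0)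
      = (M, labels.foldl (fun d x => d.insert (M.getD x 0) (d.getD (M.getD x 0) 0 + 1)) c0) := by
    rw [pvFuse labels d0 c0, hTl]
  rw [hA1, hB1]
  -- facts about ds
  have hnodup_ds : ds.Nodup := by
    rw [hdsdef, ← hofl]
    exact (PySem.Set.nodup_ofList labels).filter _
  have hnotN : ∀ x ∈ ds, x ≠ "NONE" := by
    intro x hx
    rw [hdsdef] at hx
    simpa using (List.mem_filter.1 hx).2
  have hfresh : ∀ x ∈ ds, d0.contains x = false := by
    intro x hx
    rw [hd0def, PySem.Dict.contains_insert]
    simp [hnotN x hx, PySem.Dict.contains_empty]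
  -- the table's items
  have hM : M.items = ("NONE", (0 : Int)) :: pvNum ds 1 := by
    rw [hMdef, pvIns_items ds d0 hnodup_ds hfresh]
    rfl
  have hkeysM : M.keys = "NONE" :: ds := by
    simp [PySem.Dict.keys, hM, pvNum_fst]
  have hnodup_keysM : M.keys.Nodup := by
    rw [hkeysM, List.nodup_cons]
    exact ⟨fun h => hnotN _ h rfl, hnodup_ds⟩
  set codes : List Int := (0 : Int) :: (pvNum ds 1).map (·.2) with hcodesdef
  have hcodes : M.items.map (·.2) = codes := by simp [hM, hcodesdef]
  have hpw : codes.Pairwise (· < ·) := by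
    rw [hcodesdef, List.pairwise_cons]
    refine ⟨fun c hc => ?_, pvNum_snd_pairwise ds 1⟩
    have := pvNum_snd_bound ds 1 c hc
    omega
  have hnodup_codes : codes.Nodup := hpw.imp (fun h => ne_of_lt h)
  have hmemval : ∀ p ∈ M.items, M.getD p.1 0 = p.2 := by
    intro p hp
    exact PySem.Dict.getD_of_mem_items M (by simpa using hp) hnodup_keysM 0
  have hmapcode : M.keys.map (fun x => M.getD x 0) = codes := by
    rw [← hcodes]
    simp only [PySem.Dict.keys, List.map_map]
    exact List.map_congr_left (fun p hp => hmemval p hp)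
  -- A's dist seed
  set dist0 : PySem.Dict Int Int := M.keys.foldl
      (fun d x => d.insert (M.getD x 0) 0) PySem.Dict.empty with hdist0def
  have hd0items : dist0.items = codes.map (fun c => (c, (0 : Int))) := by
    rw [hdist0def, PySem.Dict.items_foldl_insert_fresh M.keys (fun x => M.getD x 0)
        (fun _ => (0 : Int)) PySem.Dict.empty
        (fun a _ => PySem.Dict.contains_empty _) (by rw [hmapcode]; exact hnodup_codes)]
    rw [← hmapcode, List.map_map]
    rfl
  have hd0keys : dist0.keys = codes := by
    simp [PySem.Dict.keys, hd0items, List.map_map, Function.comp_def]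
  have hd0getD : ∀ c : Int, dist0.getD c 0 = 0 := by
    intro c
    by_cases hc : c ∈ codes
    · exact PySem.Dict.getD_of_mem_items dist0
        (by rw [hd0items]; exact List.mem_map.2 ⟨c, hc, rfl⟩)
        (by rw [hd0keys]; exact hnodup_codes) 0
    · apply PySem.Dict.getD_of_not_contains
      rw [PySem.Dict.contains_eq_decide_mem_keys, hd0keys]
      simpa using hc
  -- every label is a key of the table
  have hlabmem : ∀ x ∈ labels, x ∈ M.keys := by
    intro x hx
    rw [hkeysM]
    by_cases hN : x = "NONE"
    · simp [hN]
    · refine List.mem_cons_of_mem _ ?_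
      rw [hdsdef]
      refine List.mem_filter.2 ⟨?_, by simpa using hN⟩
      rw [← hofl]
      exact (PySem.Set.mem_ofList labels x).2 hx
  have hinj : ∀ x ∈ labels, ∀ y ∈ labels, M.getD x 0 = M.getD y 0 → x = y := by
    intro x hx y hy he
    exact List.inj_on_of_nodup_map (by rw [hmapcode]; exact hnodup_codes)
      (hlabmem x hx) (hlabmem y hy) he
  -- A's counting loop, rewritten over the mapped codes
  set dA : PySem.Dict Int Int := labels.foldl (fun (d : PySem.Dict Int Int) label =>
      d.modify (M.getD label 0) 0 (· + 1)) dist0 with hdAdef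
  have hfoldA : dA
      = (labels.map (fun x => M.getD x 0)).foldl
        (fun (d : PySem.Dict Int Int) c => d.modify c 0 (· + 1)) dist0 := by
    rw [hdAdef, List.foldl_map]
  have hdAkeys : dA.keys = codes := by
    rw [hfoldA, PySem.Dict.keys_foldl_modify _ 0 (fun _ _ v => v + 1) dist0, hd0keys]
    refine pvSet_update_of_subset _ codes ?_
    intro c hc
    obtain ⟨x, hx, rfl⟩ := List.mem_map.1 hc
    rw [← hmapcode]
    exact List.mem_map.2 ⟨x, hlabmem x hx, rfl⟩
  have hdAgetD : ∀ c : Int, dA.getD c 0 = ((labels.map (fun x => M.getD x 0)).count c : Int) := by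
    intro c
    rw [hfoldA, PySem.Dict.getD_foldl_modify_add_one, hd0getD]
    ring
  -- B's dist: the fused pass's counting fold, over the mapped codes
  set dB : PySem.Dict Int Int := labels.foldl
      (fun d x => d.insert (M.getD x 0) (d.getD (M.getD x 0) 0 + 1)) c0 with hdBdef
  have hfoldB : dB
      = (labels.map (fun x => M.getD x 0)).foldl
        (fun (d : PySem.Dict Int Int) c => d.insert c (d.getD c 0 + 1)) c0 := by
    rw [hdBdef, List.foldl_map]
  have hc0keys : c0.keys = [(0 : Int)] := by rw [hc0def]; rfl
  have hc0getD : ∀ c : Int, c0.getD c 0 = 0 := by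
    intro c
    rw [hc0def, PySem.Dict.getD_insert]
    split_ifs <;> simp [PySem.Dict.getD_empty]
  have hdBgetD : ∀ c : Int, dB.getD c 0 = ((labels.map (fun x => M.getD x 0)).count c : Int) := by
    intro c
    rw [hfoldB, PySem.Dict.getD_foldl_insert_add_one, hc0getD]
    ring
  -- B's dist has the same key list as A's: [0] followed by the codes in first-use order
  have hdBkeys : dB.keys = codes := by
    rw [hfoldB, PySem.Dict.keys_foldl_insert _ (fun d c => d.getD c 0 + 1) c0, hc0keys,
        PySem.Set.update_eq_append_filter, pvOfList_map (fun x => M.getD x 0) labels hinj, hofl,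
        List.filter_map]
    have hfNONE : M.getD "NONE" 0 = 0 :=
      hmemval ("NONE", 0) (by rw [hM]; exact List.mem_cons_self)
    have hNmem : "NONE" ∈ M.keys := by rw [hkeysM]; exact List.mem_cons_self
    have hcongr : ∀ x ∈ pvNew [] labels,
        ((fun y => !PySem.Set.contains [(0 : Int)] y) ∘ (fun x => M.getD x 0)) x
          = (x != "NONE") := by
      intro x hx
      have hxl : x ∈ labels := (PySem.Set.mem_ofList labels x).1 (hofl ▸ hx)
      simp only [Function.comp, PySem.Set.contains]
      by_cases hxN : x = "NONE"
      · simp [hxN, hfNONE]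
      · have : M.getD x 0 ≠ 0 := by
          intro he
          exact hxN (List.inj_on_of_nodup_map (by rw [hmapcode]; exact hnodup_codes)
            (hlabmem x hxl) hNmem (by rw [he, hfNONE]))
        simp [hxN, this]
    rw [List.filter_congr hcongr, ← hdsdef, hcodesdef]
    have : ds.map (fun x => M.getD x 0) = (pvNum ds 1).map (·.2) := by
      have := hmapcode
      rw [hkeysM, List.map_cons, hfNONE, hcodesdef] at this
      exact (List.cons_inj_right _).1 this
    rw [this]
    rfl
  -- the two dists agree as item lists
  have hfinal : dA.items = dB.items := by
    refine pvItems_ext dA dB (by rw [hdAkeys]; exact hnodup_codes) (by rw [hdAkeys, hdBkeys]) ?_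
    intro c _
    rw [hdAgetD, hdBgetD]
  rw [hfinal]
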